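-- pv_equiv track=rewrite | github.com/jacobdgm/palindrome-completer | palindrome.py | shortest_palindromic_completion
-- ===== SOURCE A (Python) =====
-- def is_palindrome(s):
--     """
--     Return s is a palindrome.
--     """
--     return s == s[::-1]
--
-- def shortest_palindromic_completion(s):
--     tail_i = 0
--     for i, _ in enumerate(s):
--         sl = s[i:]
--         if is_palindrome(sl):
--             tail_i = i
--             break
--     completion = s + s[:tail_i][::-1]
--     return completion
-- ===== SOURCE B (Python) =====
-- def shortest_palindromic_completion(s):
--     # Peel characters off the front until what remains is a palindrome,
--     # then wrap the peeled characters back around that palindromic core.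
--     peeled = []
--     while s != s[::-1]:
--         peeled.append(s[0])
--         s = s[1:]
--     out = s
--     for c in reversed(peeled):
--         out = c + out + c
--     return out
-- ===== Notes on version B (the rewrite author's own statement) =====
-- stated objective: alternative
-- what changed: A scans indices with enumerate, slices a suffix per index to palindrome-test it, then appends the reversed prefix slice; B peels characters off the front until the remainder is a palindrome and then wraps the peeled characters back around that core, building the answer structurally with no index arithmetic or prefix reversal.
import Mathlib
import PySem

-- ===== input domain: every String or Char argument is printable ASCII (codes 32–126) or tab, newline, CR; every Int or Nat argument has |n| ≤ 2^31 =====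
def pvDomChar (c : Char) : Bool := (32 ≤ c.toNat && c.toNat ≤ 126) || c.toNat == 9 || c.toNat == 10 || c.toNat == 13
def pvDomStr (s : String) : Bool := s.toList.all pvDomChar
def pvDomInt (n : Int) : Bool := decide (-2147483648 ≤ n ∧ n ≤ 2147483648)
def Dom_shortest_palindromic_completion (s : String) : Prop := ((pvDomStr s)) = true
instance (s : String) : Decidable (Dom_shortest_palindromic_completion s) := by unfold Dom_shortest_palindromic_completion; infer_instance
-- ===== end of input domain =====

-- B replaces A's index scan + prefix-slice-reverse append by a peel-and-wrap decomposition
-- (strip characters until a palindrome remains, then wrap them back around); objective: alternative.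


-- ===== PORT A =====
-- is_palindrome(s): s == s[::-1]; s[::-1] is reverse (PySem.List.slice?_none_none_neg_one)
def is_palindrome_A (l : List Char) : Bool := l == l.reverse

-- the 'for i, _ in enumerate(s): sl = s[i:]; if is_palindrome(sl): tail_i = i; break' loop;
-- falling off the end leaves tail_i at its initial 0
def spcLoopA (l : List Char) : List (Int × Char) → Int
  | [] => 0
  | (i, _) :: rest =>
      if is_palindrome_A (PySem.List.slice l (some i) none) then i else spcLoopA l rest

-- completion = s + s[:tail_i][::-1] with tail_i the loop's result
def shortest_palindromic_completion (s : String) : String :=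
  String.ofList (s.toList ++
    (PySem.List.slice s.toList none
      (some (spcLoopA s.toList (PySem.List.enumerate s.toList 0)))).reverse)

-- ===== PORT B =====
-- the 'while s != s[::-1]: peeled.append(s[0]); s = s[1:]' loop: returns (peeled, final s)
def peelB : List Char → List Char × List Char
  | [] => ([], [])   -- "" is a palindrome: the loop body never runs
  | c :: t =>
      if (c :: t) == (c :: t).reverse then ([], c :: t)
      else ((c :: (peelB t).1), (peelB t).2)

def shortest_palindromic_completion_alt (s : String) : String :=
  -- out = core; for c in reversed(peeled): out = c + out + c
  String.ofList ((peelB s.toList).1.reverse.foldl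
    (fun out c => c :: (out ++ [c])) (peelB s.toList).2)

-- ===== PRECONDITION & SPEC =====
def Spec_shortest_palindromic_completion (s : String) (out : String) : Prop := out = shortest_palindromic_completion_alt s
instance (s : String) (out : String) : Decidable (Spec_shortest_palindromic_completion s out) := by unfold Spec_shortest_palindromic_completion; infer_instance

-- ===== CLAIM (what is proved, stated in full; the proofs are below) =====
def Claim_equal_shortest_palindromic_completion : Prop := ∀ (s : String), Dom_shortest_palindromic_completion s → Spec_shortest_palindromic_completion s (shortest_palindromic_completion s)

-- ===== LEMMAS AND PROOFS =====

-- pure index-scan form of A's loop: first index ≥ j (within m steps) whose suffix is a palindrome, else 0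
def scanA (l : List Char) (j m : Nat) : Int :=
  match m with
  | 0 => 0
  | m + 1 => if is_palindrome_A (l.drop j) then (j : Int) else scanA l (j + 1) m

theorem spcLoopA_eq_scanA (u : List Char) (l : List Char) (j : Nat) :
    spcLoopA l (PySem.List.enumerate u (j : Int)) = scanA l j u.length := by
  induction u generalizing j with
  | nil => simp [PySem.List.enumerate_nil, spcLoopA, scanA]
  | cons x u ih =>
      rw [PySem.List.enumerate_cons, List.length_cons]
      simp only [spcLoopA, scanA, PySem.List.slice_from_natCast]
      have h1 : ((j : Int) + 1) = ((j + 1 : Nat) : Int) := by push_cast; ring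
      rw [h1, ih]

theorem scanA_nonneg (l : List Char) (j m : Nat) : 0 ≤ scanA l j m := by
  induction m generalizing j with
  | zero => simp [scanA]
  | succ m ih =>
      simp only [scanA]
      split
      · exact Int.natCast_nonneg j
      · exact ih (j + 1)

-- peeling off a leading character shifts A's scan by one, provided the scan over the tail succeeds
theorem scanA_shift (m : Nat) (c : Char) (t : List Char) (j : Nat)
    (hfound : ∃ i, j ≤ i ∧ i < j + m ∧ is_palindrome_A (t.drop i) = true) :
    scanA (c :: t) (j + 1) m = scanA t j m + 1 := by
  induction m generalizing j with
  | zero => obtain ⟨i, h1, h2, _⟩ := hfound; omega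
  | succ m ih =>
      have hdrop : (c :: t).drop (j + 1) = t.drop j := by simp
      simp only [scanA, hdrop]
      by_cases hp : is_palindrome_A (t.drop j) = true
      · simp [hp]
      · simp only [hp, if_false, Bool.false_eq_true]
        rw [ih (j + 1)]
        obtain ⟨i, h1, h2, h3⟩ := hfound
        rcases Nat.eq_or_lt_of_le h1 with rfl | hlt
        · exact absurd h3 hp
        · exact ⟨i, hlt, by omega, h3⟩

-- a nonempty list's final suffix is a one-character palindrome
theorem scanA_found (t : List Char) (ht : t ≠ []) :
    ∃ i, 0 ≤ i ∧ i < t.length ∧ is_palindrome_A (t.drop i) = true := by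
  refine ⟨t.length - 1, Nat.zero_le _, by
    have := List.length_pos_iff.mpr ht; omega, ?_⟩
  rw [List.drop_length_sub_one ht]
  simp [is_palindrome_A]

-- the wrap loop of B is a foldr over the peeled characters
theorem wrap_eq_foldr (w p : List Char) :
    w.reverse.foldl (fun out c => c :: (out ++ [c])) p
      = w.foldr (fun c out => c :: (out ++ [c])) p := by
  rw [List.foldl_reverse]

-- main lemma: A's list-level result equals B's, by structural induction
theorem main_eq (l : List Char) :
    l ++ (PySem.List.slice l none (some (scanA l 0 l.length))).reverse
      = (peelB l).1.foldr (fun c out => c :: (out ++ [c])) (peelB l).2 := by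
  induction l with
  | nil => simp [scanA, peelB, PySem.List.slice_to]
  | cons c t ih =>
      by_cases hp : ((c :: t) == (c :: t).reverse) = true
      · -- palindromic: A's loop breaks at i = 0, B peels nothing
        have hp' : c :: t = (c :: t).reverse := by simpa using hp
        have h0 : scanA (c :: t) 0 (c :: t).length = 0 := by
          simp [scanA, is_palindrome_A, List.length_cons]
          intro h; exact absurd hp' (by simpa using h)
        rw [h0, peelB, if_pos hp]
        simp [PySem.List.slice_to]
      · have hp' : ¬ (c :: t = (c :: t).reverse) := by simpa using hp
        have ht : t ≠ [] := by
          rintro rfl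
          exact hp' (by simp)
        have h1 : scanA (c :: t) 0 (c :: t).length = scanA t 0 t.length + 1 := by
          have h2 : scanA (c :: t) 0 (c :: t).length
              = scanA (c :: t) (0 + 1) t.length := by
            simp only [scanA, List.length_cons, List.drop_zero, is_palindrome_A]
            rw [if_neg (by simpa using hp)]
          rw [h2, scanA_shift t.length c t 0 (by simpa using scanA_found t ht)]
        have hv : 0 ≤ scanA t 0 t.length := scanA_nonneg t 0 t.length
        have htoNat : (scanA t 0 t.length + 1).toNat = (scanA t 0 t.length).toNat + 1 := by
          omega
        have hslice : PySem.List.slice (c :: t) none (some (scanA t 0 t.length + 1))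
            = (c :: t).take (scanA t 0 t.length + 1).toNat :=
          PySem.List.slice_to _ (by omega)
        rw [h1, peelB, if_neg hp]
        rw [hslice, htoNat, List.take_succ_cons, List.reverse_cons]
        rw [PySem.List.slice_to t hv] at ih
        simp only [List.foldr_cons]
        rw [← ih]
        simp

-- ===== VERDICT (by name: the statement is the Claim_ definition above) =====
theorem shortest_palindromic_completion_spec : Claim_equal_shortest_palindromic_completion := by
  intro s _
  unfold Spec_shortest_palindromic_completion
  unfold shortest_palindromic_completion shortest_palindromic_completion_alt
  have h0 : (0 : Int) = ((0 : Nat) : Int) := rfl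
  rw [h0, spcLoopA_eq_scanA, wrap_eq_foldr, main_eq]
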